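-- pv_equiv track=rewrite | github.com/nuoxoxo/leetcode | leet_1332_remove_palindrome_subseq.py | removePalindromeSub
-- ===== SOURCE A (Python) =====
-- def removePalindromeSub(s: str) -> int:
--     i = 0
--     j = len(s) - 1
--     while i <= j:
--         if s[i] == s[j]:
--             i += 1
--             j -= 1
--         else:
--             return 2
--     return 1
-- ===== SOURCE B (Python) =====
-- def removePalindromeSub(s: str) -> int:
--     return 1 if s == s[::-1] else 2
-- ===== Notes on version B (the rewrite author's own statement) =====
-- stated objective: idiomatic
-- what changed: Replaces the two-pointer inward scan with early return by building the reversed string once and comparing it to the original in a single expression.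
import Mathlib
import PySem

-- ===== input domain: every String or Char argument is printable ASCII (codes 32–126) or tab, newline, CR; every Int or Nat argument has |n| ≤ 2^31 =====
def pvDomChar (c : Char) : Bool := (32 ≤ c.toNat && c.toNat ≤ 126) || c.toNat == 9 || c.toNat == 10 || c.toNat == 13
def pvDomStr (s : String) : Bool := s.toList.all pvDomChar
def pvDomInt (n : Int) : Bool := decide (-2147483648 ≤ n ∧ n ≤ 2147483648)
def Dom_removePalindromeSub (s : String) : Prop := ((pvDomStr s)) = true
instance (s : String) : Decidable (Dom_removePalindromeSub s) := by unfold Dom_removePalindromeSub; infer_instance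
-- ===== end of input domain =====

-- B reverses the whole string and compares, instead of A's two-pointer inward scan; objective: idiomatic.

-- ===== PORT A =====
-- the while loop of A: i, j move inward while s[i] == s[j]
-- (the `| _, _ => 2` arm is unreachable from the entry point: i and j stay in range)
def pvLoopA (cs : List Char) (i j : Int) : Int :=
  if h : i ≤ j then
    match PySem.List.pyGet? cs i, PySem.List.pyGet? cs j with
    | some a, some b => if a = b then pvLoopA cs (i + 1) (j - 1) else 2
    | _, _ => 2
  else 1
termination_by (j + 1 - i).toNat
decreasing_by simp_wf; omega

def removePalindromeSub (s : String) : Int :=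
  pvLoopA s.toList 0 (PySem.Str.len s - 1)

-- ===== PORT B =====
-- s == s[::-1]; s[::-1] is exactly the code-point reversal (PySem.Str.slice?_none_none_neg_one)
def removePalindromeSub_alt (s : String) : Int :=
  if s.toList = s.toList.reverse then 1 else 2

-- ===== PRECONDITION & SPEC =====
def Spec_removePalindromeSub (s : String) (out : Int) : Prop := out = removePalindromeSub_alt s
instance (s : String) (out : Int) : Decidable (Spec_removePalindromeSub s out) := by unfold Spec_removePalindromeSub; infer_instance

-- ===== CLAIM (what is proved, stated in full; the proofs are below) =====
def Claim_equal_removePalindromeSub : Prop := ∀ (s : String), Dom_removePalindromeSub s → Spec_removePalindromeSub s (removePalindromeSub s)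

-- ===== LEMMAS AND PROOFS =====

-- A's loop returns 1 exactly when every in-window position matches its mirror (mirror index i + j - k)
theorem pvLoopA_eq_one_iff (cs : List Char) (i j : Int)
    (hi : 0 ≤ i) (hj : j < cs.length) :
    (pvLoopA cs i j = 1 ↔
      ∀ k : Int, i ≤ k → k ≤ j →
        PySem.List.pyGet? cs k = PySem.List.pyGet? cs (i + j - k)) := by
  fun_induction pvLoopA cs i j with
  | case1 i j hle b hbj hbi ih =>
    rw [ih (by omega) (by omega)]
    constructor
    · intro h k hk1 hk2
      rcases eq_or_lt_of_le hk1 with rfl | hk1'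
      · have hm : i + j - i = j := by ring
        rw [hbi, hm, hbj]
      · rcases eq_or_lt_of_le hk2 with rfl | hk2'
        · have hm : i + k - k = i := by ring
          rw [hbj, hm, hbi]
        · have := h k (by omega) (by omega)
          rw [this]; ring_nf
    · intro h k hk1 hk2
      have := h k (by omega) (by omega)
      rw [this]; ring_nf
  | case2 i j hle a b hbj hbi hne =>
    constructor
    · intro h; exact absurd h (by decide)
    · intro h
      have hthis := h i (le_refl i) hle
      have hm : i + j - i = j := by ring
      rw [hbi, hm, hbj] at hthis
      exact absurd (Option.some.inj hthis) hne
  | case3 i j hle hnone =>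
    -- unreachable: both indices are in range, so both lookups are some
    exfalso
    exact hnone (cs[i.toNat]'(by omega)) (cs[j.toNat]'(by omega))
      (by rw [PySem.List.pyGet?_of_nonneg cs hi]; exact List.getElem?_eq_getElem (by omega))
      (by rw [PySem.List.pyGet?_of_nonneg cs (i := j) (by omega)]; exact List.getElem?_eq_getElem (by omega))
  | case4 i j hgt =>
    simp only [true_iff]
    intro k hk1 hk2; omega

theorem pvLoopA_one_or_two (cs : List Char) (i j : Int) :
    pvLoopA cs i j = 1 ∨ pvLoopA cs i j = 2 := by
  fun_induction pvLoopA cs i j <;> simp_all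

-- palindrome ↔ the mirror condition over the whole index range
theorem palindrome_iff_mirror (cs : List Char) :
    (cs = cs.reverse ↔
      ∀ k : Int, 0 ≤ k → k ≤ (cs.length : Int) - 1 →
        PySem.List.pyGet? cs k = PySem.List.pyGet? cs (0 + ((cs.length : Int) - 1) - k)) := by
  constructor
  · intro hpal k hk1 hk2
    have hklt : k.toNat < cs.length := by omega
    have hm : (0 + ((cs.length : Int) - 1) - k) = ((cs.length - 1 - k.toNat : Nat) : Int) := by omega
    rw [PySem.List.pyGet?_of_nonneg cs hk1, hm, PySem.List.pyGet?_natCast]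
    have : cs[cs.length - 1 - k.toNat]? = cs.reverse[k.toNat]? := by
      rw [List.getElem?_reverse hklt]
    rw [this, ← hpal]
  · intro h
    apply List.ext_getElem (by simp)
    intro n h1 h2
    have hn : (n : Int) ≤ (cs.length : Int) - 1 := by
      simp at h1; omega
    have := h n (by positivity) hn
    rw [PySem.List.pyGet?_natCast] at this
    have hm : (0 + ((cs.length : Int) - 1) - n) = ((cs.length - 1 - n : Nat) : Int) := by
      simp at h1; omega
    rw [hm, PySem.List.pyGet?_natCast] at this
    have h1' : n < cs.length := by simpa using h1
    rw [List.getElem?_eq_getElem h1', List.getElem?_eq_getElem (by omega)] at this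
    have := Option.some.inj this
    rw [this, List.getElem_reverse]

-- ===== VERDICT (by name: the statement is the Claim_ definition above) =====
theorem removePalindromeSub_spec : Claim_equal_removePalindromeSub := by
  intro s _
  unfold Spec_removePalindromeSub removePalindromeSub removePalindromeSub_alt
  rw [PySem.Str.len_eq]
  set cs := s.toList with hcs
  have hiff := pvLoopA_eq_one_iff cs 0 ((cs.length : Int) - 1) (le_refl 0) (by omega)
  by_cases hpal : cs = cs.reverse
  · rw [if_pos hpal]
    rw [palindrome_iff_mirror cs] at hpal
    exact hiff.mpr hpal
  · rw [if_neg hpal]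
    rcases pvLoopA_one_or_two cs 0 ((cs.length : Int) - 1) with h1 | h2
    · rw [palindrome_iff_mirror cs] at hpal
      exact absurd (hiff.mp h1) hpal
    · exact h2
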